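-- pv_equiv track=rewrite | github.com/PatrikBillgren/AdventOfCode2019 | 4/2/program.py | checkDigit
-- ===== SOURCE A (Python) =====
-- def checkDigit(number):
--     numberAsString = str(number)
--
--     lastDigit = int(numberAsString[0])
--     numberDict = dict()
--
--     for char in numberAsString:
--         currDigit = int(char)
--
--         if currDigit < lastDigit:
--             return False
--
--         numberDict[char] = numberDict.get(char, 0) + 1
--
--         lastDigit = currDigit
--
--     return 2 in numberDict.values()
-- ===== SOURCE B (Python) =====
-- def checkDigit(number):
--     digits = [int(c) for c in str(number)]
--     if digits != sorted(digits):
--         return False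
--     return any(digits.count(d) == 2 for d in digits)
-- ===== Notes on version B (the rewrite author's own statement) =====
-- stated objective: simpler
-- what changed: A's single interleaved scan (order check with early return + running char-count dict) is replaced by building the digit list once, testing monotonicity by comparing it with its sorted copy, and then testing 'some digit occurs exactly twice' with digits.count in a separate pass.
import Mathlib
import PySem

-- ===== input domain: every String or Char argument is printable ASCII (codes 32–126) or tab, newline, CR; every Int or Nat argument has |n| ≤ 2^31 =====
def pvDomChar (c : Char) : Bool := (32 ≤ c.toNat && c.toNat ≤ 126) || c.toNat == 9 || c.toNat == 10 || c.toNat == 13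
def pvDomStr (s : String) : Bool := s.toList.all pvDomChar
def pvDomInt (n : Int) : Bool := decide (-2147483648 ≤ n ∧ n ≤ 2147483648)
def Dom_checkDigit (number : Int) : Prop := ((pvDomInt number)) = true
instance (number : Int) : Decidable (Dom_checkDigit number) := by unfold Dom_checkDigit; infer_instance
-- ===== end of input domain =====

-- B replaces A's interleaved order-and-count scan by a sorted-copy comparison plus a separate counting pass (objective: simpler).

-- int(<one-char string>); exact wherever Python's int() succeeds (Pre_ guarantees every char is a digit)
def pyIntChar (c : Char) : Int := (PySem.Int.ofChars? [c]).getD 0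

-- ===== PORT A =====
def checkLoop (chars : List Char) (lastDigit : Int) (numberDict : PySem.Dict Char Int) : Bool :=
  match chars with
  | [] => numberDict.values.contains 2
  | c :: rest =>
    let currDigit := pyIntChar c
    if currDigit < lastDigit then false
    else checkLoop rest currDigit (numberDict.insert c (numberDict.getD c 0 + 1))

def checkDigit (number : Int) : Bool :=
  let numberAsString := PySem.Int.toChars number
  match numberAsString with
  | [] => false   -- unreachable: str(number) is never empty
  | c0 :: _ => checkLoop numberAsString (pyIntChar c0) PySem.Dict.empty

-- ===== PORT B =====
def checkDigit_alt (number : Int) : Bool :=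
  let digits := (PySem.Int.toChars number).map pyIntChar
  if digits = PySem.List.sorted digits (fun x => x) false then
    digits.any (fun d => digits.count d == 2)
  else false

-- ===== PRECONDITION & SPEC =====
-- Pre_ excludes negative numbers: there A's int(numberAsString[0]) = int('-') raises ValueError (B raises too).
def Pre_checkDigit (number : Int) : Prop := 0 ≤ number
instance (number : Int) : Decidable (Pre_checkDigit number) := by unfold Pre_checkDigit; infer_instance
def pvWitness_checkDigit : Int := 122345

def Spec_checkDigit (number : Int) (out : Bool) : Prop := out = checkDigit_alt number
instance (number : Int) (out : Bool) : Decidable (Spec_checkDigit number out) := by unfold Spec_checkDigit; infer_instance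

-- ===== CLAIM (what is proved, stated in full; the proofs are below) =====
def Claim_equal_checkDigit : Prop := ∀ (number : Int), Dom_checkDigit number → Pre_checkDigit number → Spec_checkDigit number (checkDigit number)

-- ===== LEMMAS AND PROOFS =====

def isDigitChar (c : Char) : Prop := 48 ≤ c.toNat ∧ c.toNat ≤ 57

-- every char str() emits for a nonnegative number is a decimal digit
theorem toDigitsCore_digits (f n : Nat) (acc : List Char)
    (hacc : ∀ c ∈ acc, isDigitChar c) :
    ∀ c ∈ Nat.toDigitsCore 10 f n acc, isDigitChar c := by
  induction f generalizing n acc with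
  | zero => simpa [Nat.toDigitsCore] using hacc
  | succ f ih =>
    have hd : isDigitChar (Nat.digitChar (n % 10)) := by
      have h10 : n % 10 < 10 := Nat.mod_lt _ (by omega)
      interval_cases h : (n % 10) <;> simp_all [Nat.digitChar, isDigitChar]
    simp only [Nat.toDigitsCore]
    split
    · intro c hc
      rcases List.mem_cons.mp hc with h | h
      · exact h ▸ hd
      · exact hacc c h
    · exact ih _ _ (by
        intro c hc
        rcases List.mem_cons.mp hc with h | h
        · exact h ▸ hd
        · exact hacc c h)

theorem toChars_digits (n : Int) (hn : 0 ≤ n) :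
    ∀ c ∈ PySem.Int.toChars n, isDigitChar c := by
  simp only [PySem.Int.toChars, if_neg (not_lt.mpr hn)]
  exact toDigitsCore_digits _ _ _ (by simp)

theorem toDigitsCore_len (f n : Nat) (acc : List Char) :
    acc.length ≤ (Nat.toDigitsCore 10 f n acc).length := by
  induction f generalizing n acc with
  | zero => simp [Nat.toDigitsCore]
  | succ f ih =>
    simp only [Nat.toDigitsCore]
    split
    · simp
    · exact le_trans (by simp) (ih (n / 10) _)

theorem toChars_ne_nil (n : Int) (hn : 0 ≤ n) : PySem.Int.toChars n ≠ [] := by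
  simp only [PySem.Int.toChars, if_neg (not_lt.mpr hn), Nat.toDigits]
  simp only [Nat.toDigitsCore]
  split
  · simp
  · intro h
    have := toDigitsCore_len n.toNat (n.toNat / 10) [Nat.digitChar (n.toNat % 10)]
    rw [h] at this
    simp at this

-- pyIntChar on a digit char is its value
theorem pyIntChar_digit (c : Char) (hc : isDigitChar c) :
    pyIntChar c = (c.toNat : Int) - 48 := by
  obtain ⟨h1, h2⟩ := hc
  have hcases : c.toNat = 48 ∨ c.toNat = 49 ∨ c.toNat = 50 ∨ c.toNat = 51 ∨ c.toNat = 52 ∨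
      c.toNat = 53 ∨ c.toNat = 54 ∨ c.toNat = 55 ∨ c.toNat = 56 ∨ c.toNat = 57 := by omega
  rcases hcases with h | h | h | h | h | h | h | h | h | h
  · rw [show c = '0' from Char.ext (UInt32.toNat_inj.mp h)]; decide
  · rw [show c = '1' from Char.ext (UInt32.toNat_inj.mp h)]; decide
  · rw [show c = '2' from Char.ext (UInt32.toNat_inj.mp h)]; decide
  · rw [show c = '3' from Char.ext (UInt32.toNat_inj.mp h)]; decide
  · rw [show c = '4' from Char.ext (UInt32.toNat_inj.mp h)]; decide
  · rw [show c = '5' from Char.ext (UInt32.toNat_inj.mp h)]; decide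
  · rw [show c = '6' from Char.ext (UInt32.toNat_inj.mp h)]; decide
  · rw [show c = '7' from Char.ext (UInt32.toNat_inj.mp h)]; decide
  · rw [show c = '8' from Char.ext (UInt32.toNat_inj.mp h)]; decide
  · rw [show c = '9' from Char.ext (UInt32.toNat_inj.mp h)]; decide

theorem pyIntChar_inj (c c' : Char) (hc : isDigitChar c) (hc' : isDigitChar c')
    (h : pyIntChar c = pyIntChar c') : c = c' := by
  rw [pyIntChar_digit c hc, pyIntChar_digit c' hc'] at h
  have h' : c.toNat = c'.toNat := by omega
  exact Char.ext (UInt32.toNat_inj.mp h')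

-- A's loop, characterised: early-return monotonicity test + final count-dict check
theorem checkLoop_eq (cs : List Char) :
    ∀ (last : Int) (d : PySem.Dict Char Int),
    checkLoop cs last d =
      if (last :: cs.map pyIntChar).Pairwise (· ≤ ·) then
        (cs.foldl (fun d c => d.insert c (d.getD c 0 + 1)) d).values.contains 2
      else false := by
  induction cs with
  | nil => intro last d; simp [checkLoop]
  | cons c rest ih =>
    intro last d
    simp only [checkLoop, List.map_cons, List.foldl_cons]
    by_cases h : pyIntChar c < last
    · rw [if_pos h, if_neg]
      intro hp
      have := (List.pairwise_cons.mp hp).1 (pyIntChar c) (by simp)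
      omega
    · rw [if_neg h, ih]
      rw [not_lt] at h
      by_cases h2 : (pyIntChar c :: rest.map pyIntChar).Pairwise (· ≤ ·)
      · rw [if_pos h2, if_pos]
        refine List.pairwise_cons.mpr ⟨?_, h2⟩
        intro b hb
        rcases List.mem_cons.mp hb with rfl | hb
        · exact h
        · exact le_trans h (List.rel_of_pairwise_cons h2 hb)
      · rw [if_neg h2, if_neg (fun hp => h2 (List.Pairwise.of_cons hp))]

-- duplicating the head does not change monotonicity
theorem pairwise_dup_head (v : Int) (vs : List Int) :
    (v :: v :: vs).Pairwise (· ≤ ·) ↔ (v :: vs).Pairwise (· ≤ ·) := by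
  constructor
  · exact List.Pairwise.of_cons
  · intro h
    refine List.pairwise_cons.mpr ⟨?_, h⟩
    intro b hb
    rcases List.mem_cons.mp hb with rfl | hb
    · exact le_refl _
    · exact List.rel_of_pairwise_cons h hb

-- '2 in counts.values()' over the count dict is 'some element occurs exactly twice'
theorem counter_values_contains_two {α : Type} [DecidableEq α] (xs : List α) :
    (((PySem.Dict.counter xs).values).contains 2 = true) ↔ ∃ k ∈ xs, xs.count k = 2 := by
  simp only [PySem.Dict.values, PySem.Dict.items_counter, List.map_map, List.contains_iff_exists_mem_beq,
    List.mem_map, PySem.Set.mem_ofList]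
  constructor
  · rintro ⟨v, ⟨k, hk, rfl⟩, hb⟩
    refine ⟨k, hk, ?_⟩
    have h' := beq_iff_eq.mp hb
    simp only [Function.comp_apply] at h'
    exact_mod_cast h'.symm
  · rintro ⟨k, hk, hk2⟩
    exact ⟨(xs.count k : Int), ⟨k, hk, rfl⟩, by simp [hk2]⟩

-- counting a digit char in the string ↔ counting its value in the digit list
theorem exists_count_map (cs : List Char) (hd : ∀ c ∈ cs, isDigitChar c) :
    (∃ c ∈ cs, cs.count c = 2) ↔ (∃ v ∈ cs.map pyIntChar, (cs.map pyIntChar).count v = 2) := by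
  have hcount : ∀ c ∈ cs, (cs.map pyIntChar).count (pyIntChar c) = cs.count c := by
    intro c hc
    rw [List.count_eq_countP, List.count_eq_countP, List.countP_map]
    apply List.countP_congr
    intro x hx
    by_cases hxc : x = c
    · subst hxc; simp
    · have hne : pyIntChar x ≠ pyIntChar c :=
        fun he => hxc (pyIntChar_inj x c (hd x hx) (hd c hc) he)
      simp [Function.comp, hxc, hne]
  constructor
  · rintro ⟨c, hc, h2⟩
    exact ⟨pyIntChar c, List.mem_map_of_mem hc, by rw [hcount c hc]; exact h2⟩
  · rintro ⟨v, hv, h2⟩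
    obtain ⟨c, hc, rfl⟩ := List.mem_map.mp hv
    exact ⟨c, hc, by rw [← hcount c hc]; exact h2⟩

-- the sorted-copy comparison ↔ non-decreasing
theorem sorted_eq_iff_pairwise (vs : List Int) :
    (vs = PySem.List.sorted vs (fun x => x) false) ↔ vs.Pairwise (· ≤ ·) := by
  constructor
  · intro h
    rw [h]
    exact PySem.List.sorted_pairwise vs (fun x => x)
  · intro h
    exact (PySem.List.sorted_eq_self_of_pairwise vs (fun x => x) h).symm

-- ===== VERDICT (by name: the statement is the Claim_ definition above) =====
theorem checkDigit_spec : Claim_equal_checkDigit := by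
  intro number _ hpre
  unfold Spec_checkDigit
  have hdig := toChars_digits number hpre
  cases hcs : PySem.Int.toChars number with
  | nil => exact absurd hcs (toChars_ne_nil number hpre)
  | cons c0 t =>
    rw [hcs] at hdig
    simp only [checkDigit, checkDigit_alt, hcs]
    rw [checkLoop_eq, PySem.Dict.foldl_insert_getD_add_one_eq_counter]
    have hdup : ((pyIntChar c0 :: (c0 :: t).map pyIntChar).Pairwise (· ≤ ·)) ↔
        (((c0 :: t).map pyIntChar).Pairwise (· ≤ ·)) := by
      rw [List.map_cons]; exact pairwise_dup_head _ _
    by_cases hP : (((c0 :: t).map pyIntChar).Pairwise (· ≤ ·))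
    · rw [if_pos (hdup.mpr hP), if_pos ((sorted_eq_iff_pairwise _).mpr hP)]
      have h1 := counter_values_contains_two (c0 :: t)
      have h2 : (((c0 :: t).map pyIntChar).any (fun d => ((c0 :: t).map pyIntChar).count d == 2) = true)
          ↔ ∃ v ∈ (c0 :: t).map pyIntChar, ((c0 :: t).map pyIntChar).count v = 2 := by
        simp [List.any_eq_true]
      rcases Bool.eq_false_or_eq_true (((c0 :: t).map pyIntChar).any
          (fun d => ((c0 :: t).map pyIntChar).count d == 2)) with hb | hb <;> rw [hb]
      · exact h1.mpr ((exists_count_map (c0 :: t) hdig).mpr (h2.mp hb))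
      · rw [← Bool.not_eq_true, h1]
        intro hex
        have hx2 := h2.mpr ((exists_count_map (c0 :: t) hdig).mp hex)
        rw [hb] at hx2
        exact Bool.false_ne_true hx2
    · rw [if_neg (fun hp => hP (hdup.mp hp)), if_neg (fun hs => hP ((sorted_eq_iff_pairwise _).mp hs))]
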